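-- pv_equiv track=rewrite | github.com/rsalesc/rbx | rbx/box/stressing/whitespace.py | normalize_trailing_lines
-- ===== SOURCE A (Python) =====
-- from typing import List
--
-- def normalize_text(text: str) -> str:
--     stripped = text.strip()
--     if stripped == '':
--         return ''
--     return stripped + '\n'
--
-- def normalize_trailing_lines(lines: List[str]) -> str:
--     i = 0
--     while i < len(lines) and lines[i].strip() == '':
--         i += 1
--     if i == len(lines):
--         return ''
--     lines = lines[i:]
--     while lines and lines[-1].strip() == '':
--         lines.pop()
--     lines = [line.rstrip('\n') for line in lines]
--     return normalize_text('\n'.join(lines))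
-- ===== SOURCE B (Python) =====
-- def normalize_text(text: str) -> str:
--     stripped = text.strip()
--     if stripped == '':
--         return ''
--     return stripped + '\n'
--
-- def normalize_trailing_lines(lines):
--     # normalize_text's strip() already removes leading/trailing blank lines,
--     # so the explicit trimming loops are unnecessary.
--     return normalize_text('\n'.join(line.rstrip('\n') for line in lines))
-- ===== Notes on version B (the rewrite author's own statement) =====
-- stated objective: simpler
-- what changed: B drops A's leading-skip and trailing-pop loops entirely: normalize_text's strip() already removes leading/trailing whitespace-only lines and separators, so B just joins the '\n'-rstripped lines and normalizes.
import Mathlib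
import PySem

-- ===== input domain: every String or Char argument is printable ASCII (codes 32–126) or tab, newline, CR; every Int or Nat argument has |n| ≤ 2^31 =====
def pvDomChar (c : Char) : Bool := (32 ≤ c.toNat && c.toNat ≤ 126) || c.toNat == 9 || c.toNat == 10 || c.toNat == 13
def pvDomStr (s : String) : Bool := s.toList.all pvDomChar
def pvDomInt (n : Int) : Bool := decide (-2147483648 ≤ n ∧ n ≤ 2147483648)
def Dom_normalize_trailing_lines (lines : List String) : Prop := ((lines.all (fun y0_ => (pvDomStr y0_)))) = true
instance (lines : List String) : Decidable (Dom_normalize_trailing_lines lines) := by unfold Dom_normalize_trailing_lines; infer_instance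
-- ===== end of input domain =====

-- B drops A's leading-skip and trailing-pop loops: normalize_text's strip() already
-- removes leading/trailing whitespace-only lines, so B just joins the rstripped lines.


-- ===== PORT A =====
-- str.rstrip('\n') ported by hand on char lists (PySem has no per-char rstrip); exact:
-- drop trailing '\n' characters.
def pyRstripNewline (cs : List Char) : List Char := (cs.reverse.dropWhile (· == '\n')).reverse

-- module helper normalize_text, on char lists
def pyNormalizeText (cs : List Char) : List Char :=
  let stripped := PySem.Chars.strip cs
  if stripped = [] then [] else stripped ++ ['\n']

-- A's 'while … lines[i].strip() == ''' loop: drop lines while line.strip() == ''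
def dropBlankPrefix : List (List Char) → List (List Char)
  | [] => []
  | l :: ls => if PySem.Chars.strip l = [] then dropBlankPrefix ls else l :: ls

def normalize_trailing_lines (lines : List String) : String :=
  let ls := dropBlankPrefix (lines.map String.toList)
  if ls = [] then ""  -- i == len(lines)
  else
    -- the trailing 'while lines and lines[-1].strip() == '': lines.pop()' loop
    let ls2 := (dropBlankPrefix ls.reverse).reverse
    String.ofList (pyNormalizeText (PySem.Chars.join ['\n'] (ls2.map pyRstripNewline)))

-- ===== PORT B =====
def normalize_trailing_lines_alt (lines : List String) : String :=
  String.ofList (pyNormalizeText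
    (PySem.Chars.join ['\n'] (lines.map (fun l => pyRstripNewline l.toList))))

-- ===== PRECONDITION & SPEC =====
def Spec_normalize_trailing_lines (lines : List String) (out : String) : Prop := out = normalize_trailing_lines_alt lines
instance (lines : List String) (out : String) : Decidable (Spec_normalize_trailing_lines lines out) := by unfold Spec_normalize_trailing_lines; infer_instance

-- ===== CLAIM (what is proved, stated in full; the proofs are below) =====
def Claim_equal_normalize_trailing_lines : Prop := ∀ (lines : List String), Dom_normalize_trailing_lines lines → Spec_normalize_trailing_lines lines (normalize_trailing_lines lines)

-- ===== LEMMAS AND PROOFS =====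

-- a line strips to empty iff all its characters are whitespace
theorem strip_eq_nil_iff (l : List Char) :
    PySem.Chars.strip l = [] ↔ ∀ c ∈ l, PySem.Chars.isspace c = true := by
  unfold PySem.Chars.strip PySem.Chars.rstrip PySem.Chars.lstrip
  constructor
  · intro h c hc
    rw [List.reverse_eq_nil_iff, List.dropWhile_eq_nil_iff] at h
    rcases (List.takeWhile_append_dropWhile (p := PySem.Chars.isspace) (l := l)) ▸ hc |> List.mem_append.mp with h1 | h1
    · exact List.mem_takeWhile_imp h1
    · exact h _ (List.mem_reverse.mpr h1)
  · intro h
    rw [List.reverse_eq_nil_iff, List.dropWhile_eq_nil_iff]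
    intro c hc
    exact h c ((List.dropWhile_sublist _).subset (List.mem_reverse.mp hc))

theorem mem_pyRstripNewline {c : Char} {l : List Char} (h : c ∈ pyRstripNewline l) : c ∈ l := by
  unfold pyRstripNewline at h
  exact List.mem_reverse.mp ((List.dropWhile_sublist _).subset (List.mem_reverse.mp h))

theorem lstrip_append_allws {p t : List Char} (h : ∀ c ∈ p, PySem.Chars.isspace c = true) :
    PySem.Chars.lstrip (p ++ t) = PySem.Chars.lstrip t := by
  unfold PySem.Chars.lstrip
  rw [List.dropWhile_append, List.dropWhile_eq_nil_iff.mpr h]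
  simp

theorem rstrip_append_allws {t q : List Char} (h : ∀ c ∈ q, PySem.Chars.isspace c = true) :
    PySem.Chars.rstrip (t ++ q) = PySem.Chars.rstrip t := by
  unfold PySem.Chars.rstrip
  rw [List.reverse_append, List.dropWhile_append,
    List.dropWhile_eq_nil_iff.mpr (fun c hc => h c (List.mem_reverse.mp hc))]
  simp

theorem strip_append_allws_left {p t : List Char} (h : ∀ c ∈ p, PySem.Chars.isspace c = true) :
    PySem.Chars.strip (p ++ t) = PySem.Chars.strip t := by
  unfold PySem.Chars.strip
  rw [lstrip_append_allws h]

theorem strip_append_allws_right {t q : List Char} (h : ∀ c ∈ q, PySem.Chars.isspace c = true) :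
    PySem.Chars.strip (t ++ q) = PySem.Chars.strip t := by
  unfold PySem.Chars.strip PySem.Chars.lstrip
  rw [List.dropWhile_append]
  by_cases ht : List.dropWhile PySem.Chars.isspace t = []
  · rw [ht, List.dropWhile_eq_nil_iff.mpr h]
    simp [PySem.Chars.rstrip]
  · rw [if_neg (by simpa [List.isEmpty_iff] using ht)]
    exact rstrip_append_allws h

theorem join_append_singleton (sep z : List Char) {ys : List (List Char)} (h : ys ≠ []) :
    PySem.Chars.join sep (ys ++ [z]) = PySem.Chars.join sep ys ++ sep ++ z := by
  induction ys with
  | nil => exact absurd rfl h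
  | cons y ys ih =>
    cases ys with
    | nil => simp [PySem.Chars.join_cons_cons, PySem.Chars.join_singleton]
    | cons y' ys' =>
      calc PySem.Chars.join sep ((y :: y' :: ys') ++ [z])
          = PySem.Chars.join sep (y :: y' :: (ys' ++ [z])) := rfl
        _ = y ++ sep ++ PySem.Chars.join sep (y' :: (ys' ++ [z])) :=
            PySem.Chars.join_cons_cons sep y y' (ys' ++ [z])
        _ = y ++ sep ++ PySem.Chars.join sep ((y' :: ys') ++ [z]) := rfl
        _ = y ++ sep ++ (PySem.Chars.join sep (y' :: ys') ++ sep ++ z) := by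
            rw [ih (by simp)]
        _ = y ++ sep ++ PySem.Chars.join sep (y' :: ys') ++ sep ++ z := by
            simp [List.append_assoc]
        _ = PySem.Chars.join sep (y :: y' :: ys') ++ sep ++ z := by
            rw [PySem.Chars.join_cons_cons]

-- strip∘join∘map-rstripNl is unchanged by dropping leading blank lines
theorem strip_join_dropBlankPrefix (ls : List (List Char)) :
    PySem.Chars.strip (PySem.Chars.join ['\n'] ((dropBlankPrefix ls).map pyRstripNewline)) =
    PySem.Chars.strip (PySem.Chars.join ['\n'] (ls.map pyRstripNewline)) := by
  induction ls with
  | nil => rfl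
  | cons l ls ih =>
    by_cases hb : PySem.Chars.strip l = []
    · have hws : ∀ c ∈ pyRstripNewline l ++ ['\n'], PySem.Chars.isspace c = true := by
        intro c hc
        rcases List.mem_append.mp hc with hc | hc
        · exact (strip_eq_nil_iff l).mp hb c (mem_pyRstripNewline hc)
        · simp at hc; subst hc; decide
      rw [dropBlankPrefix, if_pos hb, ih]
      cases ls with
      | nil =>
        simp only [List.map_nil, List.map_cons, PySem.Chars.join_nil, PySem.Chars.join_singleton]
        have : PySem.Chars.strip (pyRstripNewline l) = [] := by
          rw [strip_eq_nil_iff]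
          intro c hc
          exact (strip_eq_nil_iff l).mp hb c (mem_pyRstripNewline hc)
        rw [this]; rfl
      | cons l' ls' =>
        have hj : PySem.Chars.join ['\n'] (List.map pyRstripNewline (l :: l' :: ls'))
            = pyRstripNewline l ++ ['\n'] ++
              PySem.Chars.join ['\n'] (pyRstripNewline l' :: List.map pyRstripNewline ls') := by
          rw [show List.map pyRstripNewline (l :: l' :: ls') = pyRstripNewline l ::
                pyRstripNewline l' :: List.map pyRstripNewline ls' from rfl]
          exact PySem.Chars.join_cons_cons ..
        rw [hj]
        exact (strip_append_allws_left hws).symm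
    · rw [dropBlankPrefix, if_neg hb]

-- dropping a single trailing blank line does not change strip∘join∘map-rstripNl
theorem strip_join_drop_last {l : List Char} (hb : PySem.Chars.strip l = []) (xs : List (List Char)) :
    PySem.Chars.strip (PySem.Chars.join ['\n'] ((xs ++ [l]).map pyRstripNewline)) =
    PySem.Chars.strip (PySem.Chars.join ['\n'] (xs.map pyRstripNewline)) := by
  have hws : ∀ c ∈ ('\n' :: pyRstripNewline l), PySem.Chars.isspace c = true := by
    intro c hc
    rcases List.mem_cons.mp hc with hc | hc
    · subst hc; decide
    · exact (strip_eq_nil_iff l).mp hb c (mem_pyRstripNewline hc)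
  cases xs with
  | nil =>
    simp only [List.nil_append, List.map_cons, List.map_nil, PySem.Chars.join_singleton,
      PySem.Chars.join_nil]
    rw [show PySem.Chars.strip (pyRstripNewline l) = [] from
      (strip_eq_nil_iff _).mpr (fun c hc => (strip_eq_nil_iff l).mp hb c (mem_pyRstripNewline hc))]
    rfl
  | cons x xs =>
    rw [List.map_append,
      show List.map pyRstripNewline [l] = [pyRstripNewline l] from rfl,
      join_append_singleton _ _ (by simp), List.append_assoc]
    exact strip_append_allws_right (by simpa using hws)

-- strip∘join∘map-rstripNl is unchanged by dropping trailing blank lines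
theorem strip_join_dropBlankSuffix (ls : List (List Char)) :
    PySem.Chars.strip (PySem.Chars.join ['\n'] (((dropBlankPrefix ls.reverse).reverse).map pyRstripNewline)) =
    PySem.Chars.strip (PySem.Chars.join ['\n'] (ls.map pyRstripNewline)) := by
  induction ls using List.reverseRecOn with
  | nil => rfl
  | append_singleton xs l ih =>
    rw [List.reverse_append, List.reverse_cons, List.reverse_nil, List.nil_append,
      List.singleton_append]
    by_cases hb : PySem.Chars.strip l = []
    · rw [dropBlankPrefix, if_pos hb, strip_join_drop_last hb]
      exact ih
    · rw [dropBlankPrefix, if_neg hb, List.reverse_cons, List.reverse_reverse]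

theorem pyNormalizeText_congr {cs ds : List Char}
    (h : PySem.Chars.strip cs = PySem.Chars.strip ds) :
    pyNormalizeText cs = pyNormalizeText ds := by
  unfold pyNormalizeText
  rw [h]

-- ===== VERDICT (by name: the statement is the Claim_ definition above) =====
theorem normalize_trailing_lines_spec : Claim_equal_normalize_trailing_lines := by
  intro lines _
  unfold Spec_normalize_trailing_lines normalize_trailing_lines normalize_trailing_lines_alt
  simp only []
  set ls0 := lines.map String.toList with hls0
  have hmap : lines.map (fun l => pyRstripNewline l.toList) = ls0.map pyRstripNewline := by
    rw [hls0, List.map_map]; rfl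
  by_cases h : dropBlankPrefix ls0 = []
  · rw [if_pos h, hmap]
    have h1 := strip_join_dropBlankPrefix ls0
    rw [h] at h1
    have h2 : PySem.Chars.strip (PySem.Chars.join ['\n'] (ls0.map pyRstripNewline)) = [] := by
      rw [← h1]; rfl
    rw [show pyNormalizeText (PySem.Chars.join ['\n'] (ls0.map pyRstripNewline)) = [] by
      unfold pyNormalizeText; rw [h2]; rfl]
  · rw [if_neg h, hmap]
    refine congrArg String.ofList (pyNormalizeText_congr ?_)
    rw [strip_join_dropBlankSuffix (dropBlankPrefix ls0), strip_join_dropBlankPrefix ls0]
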